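-- pv_equiv track=rewrite | github.com/wjddlsqja13/K_Coders_HKU | Team_B/Solutions/Algorithm/5. Dynamic Programming/HAD007_Dongun.py | legoBlocks
-- ===== SOURCE A (Python) =====
-- def legoBlocks(n, m):
--     # Write your code here
--     MOD = 10 ** 9 + 7
--     t = [0] * (m+1) # total ways
--     g = [0] * (m+1) # good ways
--     t[0], g[1] = 1, 1
--
--     for i in range(1, m+1):
--         t[i] += t[i-1] if i-1>=0 else 0
--         t[i] += t[i-2] if i-2>=0 else 0
--         t[i] += t[i-3] if i-3>=0 else 0
--         t[i] += t[i-4] if i-4>=0 else 0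
--     for i in range(1, m+1):
--         t[i] %= MOD
--         t[i] **= n
--         t[i] %= MOD
--
--     for i in range(2, m+1):
--         g[i] = t[i]
--         for j in range(1, i):
--             g[i] -= g[j] * t[i-j]
--         g[i] %= MOD
--
--     return g[m]
-- ===== SOURCE B (Python) =====
-- def _mul(a, b, k, MOD):
--     # product of the polynomials a and b, truncated to degree < k:
--     # coefficient s pairs a[lo:s+1] with the reversed prefix of b
--     out = []
--     for s in range(k):
--         lo = max(0, s + 1 - len(b))
--         out.append(sum(x * y for x, y in zip(a[lo:s + 1], b[s - lo::-1])) % MOD)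
--     return out
--
-- def legoBlocks(n, m):
--     MOD = 10 ** 9 + 7
--     size = m + 1
--     # single-row tilings (tetranacci), kept reduced mod MOD
--     r = [1, 1, 2, 4]
--     while len(r) < size:
--         r.append((r[-1] + r[-2] + r[-3] + r[-4]) % MOD)
--     t = [pow(c, n, MOD) for c in r[:size]]
--     # Newton iteration for the reciprocal power series inv = 1/T mod x^size:
--     # each step inv <- inv*(2 - T*inv) doubles the number of correct coefficients
--     inv = [1]
--     k = 1
--     while k < size:
--         k = min(2 * k, size)
--         e = _mul(t[:k], inv, k, MOD)
--         c = [(2 - e[0]) % MOD] + [(-x) % MOD for x in e[1:]]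
--         inv = _mul(inv, c, k, MOD)
--     # G = 1 - 1/T, so the number of solid walls is -inv[m] mod MOD
--     return (MOD - inv[m]) % MOD
-- ===== Notes on version B (the rewrite author's own statement) =====
-- stated objective: alternative
-- what changed: B replaces A's O(m^2) inclusion-exclusion recurrence for the 'good ways' array by Newton iteration for the reciprocal power series 1/T (inv <- inv*(2 - T*inv), doubling the correct prefix, with an explicit truncated polynomial multiplication helper), returning -inv[m] mod p since G = 1 - 1/T; rows are kept reduced mod p and raised with 3-argument pow.
-- outside the precondition, e.g. on legoBlocks(-2, 3): A returns 0.5625, B returns 62500001; on legoBlocks(-2, 1): A returns 1, B returns 1; on legoBlocks(5, 0): A raises IndexError, B returns 1000000006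
import Mathlib
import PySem

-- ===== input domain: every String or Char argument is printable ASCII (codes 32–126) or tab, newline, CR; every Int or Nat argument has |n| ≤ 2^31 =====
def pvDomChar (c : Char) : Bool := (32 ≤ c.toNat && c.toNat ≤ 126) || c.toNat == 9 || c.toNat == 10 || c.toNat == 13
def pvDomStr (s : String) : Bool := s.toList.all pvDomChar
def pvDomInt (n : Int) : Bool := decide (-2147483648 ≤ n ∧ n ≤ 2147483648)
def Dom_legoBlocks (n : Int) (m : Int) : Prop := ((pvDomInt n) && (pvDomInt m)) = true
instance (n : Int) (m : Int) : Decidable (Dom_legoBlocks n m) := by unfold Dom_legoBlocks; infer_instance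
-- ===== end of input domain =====

-- B replaces A's inclusion-exclusion 'good ways' recurrence by Newton iteration for the
-- reciprocal power series 1/T (inv <- inv*(2 - T*inv) with truncated polynomial products);
-- alternative algorithm, same asymptotic cost.

def pvMOD : Int := 10 ^ 9 + 7

-- ===== PORT A =====
-- Python preallocates t/g as [0]*(m+1) and assigns t[i]/g[i] left to right from
-- earlier entries only; ported as append-builders over the same loop ranges.
def legoA1 : List Int → Nat → List Int
  | tl, 0 => tl
  | tl, Nat.succ k =>
    let i := tl.length
    let v := tl.getD (i - 1) 0
      + (if 2 ≤ i then tl.getD (i - 2) 0 else 0)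
      + (if 3 ≤ i then tl.getD (i - 3) 0 else 0)
      + (if 4 ≤ i then tl.getD (i - 4) 0 else 0)
    legoA1 (tl ++ [v]) k

-- second loop: t[i] %= MOD; t[i] **= n; t[i] %= MOD  (i = 1..m; t[0] untouched)
def legoA2 (N : Nat) (tl : List Int) : List Int :=
  tl.mapIdx (fun i x => if i = 0 then x else ((x % pvMOD) ^ N) % pvMOD)

-- inner loop of the third pass: g[i] = t[i]; for j in range(1, i): g[i] -= g[j]*t[i-j]
def legoSumG (g t : List Int) (i : Nat) : Int :=
  (List.range' 1 (i - 1)).foldl (fun s j => s - g.getD j 0 * t.getD (i - j) 0) (t.getD i 0)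

def legoA3 (t : List Int) : List Int → Nat → List Int
  | gl, 0 => gl
  | gl, Nat.succ k =>
    let i := gl.length
    legoA3 t (gl ++ [legoSumG gl t i % pvMOD]) k

def legoBlocks (n : Int) (m : Int) : Int :=
  let M := m.toNat
  let t := legoA2 n.toNat (legoA1 [1] M)
  let g := legoA3 t [0, 1] (M - 1)
  g.getD M 0

-- ===== PORT B =====
-- _mul(a, b, k, MOD): coefficient s zips a[lo:s+1] with the reversed prefix
-- b[s-lo::-1] (lo = max(0, s+1-len(b)), via Nat subtraction) and reduces mod MOD
def bMulCoeff (a b : List Int) (s : Nat) : Int :=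
  let lo := s + 1 - b.length
  (((a.drop lo).take (s + 1 - lo)).zip ((b.take (s - lo + 1)).reverse)).foldl
    (fun acc p => acc + p.1 * p.2) 0

def bMul (a b : List Int) (k : Nat) : List Int :=
  (List.range k).map (fun s => bMulCoeff a b s % pvMOD)

-- while len(r) < size: r.append((r[-1]+r[-2]+r[-3]+r[-4]) % MOD); r always has ≥ 4
-- entries, so the negative indices are the last four (ported via length - j)
def bRowsLoop : List Int → Nat → List Int
  | r, 0 => r
  | r, Nat.succ k =>
    bRowsLoop (r ++ [(r.getD (r.length - 1) 0 + r.getD (r.length - 2) 0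
      + r.getD (r.length - 3) 0 + r.getD (r.length - 4) 0) % pvMOD]) k

-- while k < size: k = min(2k, size); e = _mul(t[:k], inv, k); c = [(2-e[0])%MOD] +
-- [(-x)%MOD for x in e[1:]]; inv = _mul(inv, c, k).  The while loop is ported with
-- fuel; fuel = size suffices since k ≥ 1 strictly increases each iteration.
def bNewton (t : List Int) (size : Nat) : List Int → Nat → Nat → List Int
  | inv, _, 0 => inv
  | inv, k, Nat.succ fuel =>
    if k < size then
      let k' := min (2 * k) size
      let e := bMul (t.take k') inv k'
      let c := ((2 - e.getD 0 0) % pvMOD) :: (e.drop 1).map (fun x => (-x) % pvMOD)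
      bNewton t size (bMul inv c k') k' fuel
    else inv

-- pow(c, n, MOD) with c ≥ 0, n ≥ 0 (guaranteed inside Pre_) is exactly c^n % MOD
def legoBlocks_alt (n : Int) (m : Int) : Int :=
  let size := m.toNat + 1
  let r := bRowsLoop [1, 1, 2, 4] (size - 4)
  let t := (r.take size).map (fun c => (c ^ n.toNat) % pvMOD)
  let inv := bNewton t size [1] 1 size
  (pvMOD - inv.getD m.toNat 0) % pvMOD

-- ===== PRECONDITION & SPEC =====
-- Pre_ excludes m ≤ 0, where A raises IndexError (g[1] out of range), and n < 0,
-- where A's ** yields a float (returned as-is for m ≥ 2, an accidental int 1 only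
-- when m = 1) while B's 3-arg pow would compute modular inverses.
def Pre_legoBlocks (n : Int) (m : Int) : Prop := 0 ≤ n ∧ 1 ≤ m
instance (n : Int) (m : Int) : Decidable (Pre_legoBlocks n m) := by unfold Pre_legoBlocks; infer_instance

def pvWitness_legoBlocks : Int × Int := (3, 2)

def Spec_legoBlocks (n : Int) (m : Int) (out : Int) : Prop := out = legoBlocks_alt n m
instance (n : Int) (m : Int) (out : Int) : Decidable (Spec_legoBlocks n m out) := by unfold Spec_legoBlocks; infer_instance

-- ===== CLAIM (what is proved, stated in full; the proofs are below) =====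
def Claim_equal_legoBlocks : Prop := ∀ (n : Int) (m : Int), Dom_legoBlocks n m → Pre_legoBlocks n m → Spec_legoBlocks n m (legoBlocks n m)

-- ===== LEMMAS AND PROOFS =====

-- the raw tetranacci row counts A's first loop computes
def trawAux : Nat → Int × Int × Int × Int
  | 0 => (1, 0, 0, 0)
  | i + 1 =>
    let p := trawAux i
    (p.1 + p.2.1 + p.2.2.1 + p.2.2.2, p.1, p.2.1, p.2.2.1)

def traw (i : Nat) : Int := (trawAux i).1

-- the shared per-index value of both t arrays after the power pass
def tP (N i : Nat) : Int := if i = 0 then 1 else ((traw i % pvMOD) ^ N) % pvMOD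

-- reduced row counts as B's r list holds them
def rowm (i : Nat) : Int := traw i % pvMOD

-- cast of a list entry into ZMod p
def zc (l : List Int) (i : Nat) : ZMod 1000000007 := ((l.getD i 0 : Int) : ZMod 1000000007)

def psOf (l : List Int) : PowerSeries (ZMod 1000000007) := PowerSeries.mk (zc l)

-- the Newton invariant: the first k coefficients of T * inv are those of 1
def BInv (T inv : List Int) (k : Nat) : Prop :=
  ∀ s, s < k → PowerSeries.coeff s (psOf T * psOf inv)
    = PowerSeries.coeff s 1

theorem trawAux_eq (i : Nat) : trawAux i =
    (traw i, if 1 ≤ i then traw (i - 1) else 0, if 2 ≤ i then traw (i - 2) else 0,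
      if 3 ≤ i then traw (i - 3) else 0) := by
  induction i with
  | zero => simp [trawAux, traw]
  | succ i ih =>
    have e : trawAux (i + 1) =
        ((trawAux i).1 + (trawAux i).2.1 + (trawAux i).2.2.1 + (trawAux i).2.2.2,
          (trawAux i).1, (trawAux i).2.1, (trawAux i).2.2.1) := rfl
    have e1 : traw (i + 1) =
        (trawAux i).1 + (trawAux i).2.1 + (trawAux i).2.2.1 + (trawAux i).2.2.2 := rfl
    rw [e, e1, ih]
    simp [Nat.succ_le_succ_iff, Nat.succ_sub_succ, traw]

theorem traw_succ (i : Nat) : traw (i + 1) = traw i + (if 1 ≤ i then traw (i - 1) else 0)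
    + (if 2 ≤ i then traw (i - 2) else 0) + (if 3 ≤ i then traw (i - 3) else 0) := by
  have e1 : traw (i + 1) =
      (trawAux i).1 + (trawAux i).2.1 + (trawAux i).2.2.1 + (trawAux i).2.2.2 := rfl
  rw [e1, trawAux_eq i]

theorem traw_one : traw 1 = 1 := by norm_num [traw, trawAux]

theorem legoA1_step (L : Nat) (hL : 1 ≤ L) :
    traw (L - 1) + (if 2 ≤ L then traw (L - 2) else 0) + (if 3 ≤ L then traw (L - 3) else 0)
      + (if 4 ≤ L then traw (L - 4) else 0) = traw L := by
  have h := traw_succ (L - 1)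
  rw [show L - 1 + 1 = L by omega] at h
  rw [h]
  have e2 : (if 1 ≤ L - 1 then traw (L - 1 - 1) else 0) = (if 2 ≤ L then traw (L - 2) else 0) := by
    split_ifs <;> first | (congr 1; omega) | omega | rfl
  have e3 : (if 2 ≤ L - 1 then traw (L - 1 - 2) else 0) = (if 3 ≤ L then traw (L - 3) else 0) := by
    split_ifs <;> first | (congr 1; omega) | omega | rfl
  have e4 : (if 3 ≤ L - 1 then traw (L - 1 - 3) else 0) = (if 4 ≤ L then traw (L - 4) else 0) := by
    split_ifs <;> first | (congr 1; omega) | omega | rfl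
  rw [e2, e3, e4]

theorem getD_map_range (f : Nat → Int) (L j : Nat) (h : j < L) :
    ((List.range L).map f).getD j 0 = f j := by
  simp [List.getD_eq_getElem?_getD, h]

theorem getD_append_lt (l l' : List Int) (j : Nat) (h : j < l.length) :
    (l ++ l').getD j 0 = l.getD j 0 := by
  simp [List.getD_eq_getElem?_getD, List.getElem?_append_left h]

theorem getD_append_self (l : List Int) (x : Int) : (l ++ [x]).getD l.length 0 = x := by
  simp [List.getD_eq_getElem?_getD]

theorem legoA1_succ (tl : List Int) (k : Nat) : legoA1 tl (k + 1) =
    legoA1 (tl ++ [tl.getD (tl.length - 1) 0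
      + (if 2 ≤ tl.length then tl.getD (tl.length - 2) 0 else 0)
      + (if 3 ≤ tl.length then tl.getD (tl.length - 3) 0 else 0)
      + (if 4 ≤ tl.length then tl.getD (tl.length - 4) 0 else 0)]) k := rfl

theorem legoA1_spec (k : Nat) : ∀ L, 1 ≤ L →
    legoA1 ((List.range L).map traw) k = (List.range (L + k)).map traw := by
  induction k with
  | zero => intro L _; simp [legoA1]
  | succ k ih =>
    intro L hL
    rw [legoA1_succ]
    have hlen : ((List.range L).map traw).length = L := by simp
    have hv : ((List.range L).map traw).getD (((List.range L).map traw).length - 1) 0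
        + (if 2 ≤ ((List.range L).map traw).length then
            ((List.range L).map traw).getD (((List.range L).map traw).length - 2) 0 else 0)
        + (if 3 ≤ ((List.range L).map traw).length then
            ((List.range L).map traw).getD (((List.range L).map traw).length - 3) 0 else 0)
        + (if 4 ≤ ((List.range L).map traw).length then
            ((List.range L).map traw).getD (((List.range L).map traw).length - 4) 0 else 0)
        = traw L := by
      rw [hlen, getD_map_range traw L (L - 1) (by omega)]
      have e2 : (if 2 ≤ L then ((List.range L).map traw).getD (L - 2) 0 else 0)
          = (if 2 ≤ L then traw (L - 2) else 0) := by
        split_ifs with h; · rw [getD_map_range traw L (L - 2) (by omega)]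
        · rfl
      have e3 : (if 3 ≤ L then ((List.range L).map traw).getD (L - 3) 0 else 0)
          = (if 3 ≤ L then traw (L - 3) else 0) := by
        split_ifs with h; · rw [getD_map_range traw L (L - 3) (by omega)]
        · rfl
      have e4 : (if 4 ≤ L then ((List.range L).map traw).getD (L - 4) 0 else 0)
          = (if 4 ≤ L then traw (L - 4) else 0) := by
        split_ifs with h; · rw [getD_map_range traw L (L - 4) (by omega)]
        · rfl
      rw [e2, e3, e4, legoA1_step L hL]
    rw [hv]
    have happ : (List.range L).map traw ++ [traw L] = (List.range (L + 1)).map traw := by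
      rw [List.range_succ]; simp
    rw [happ, show L + (k + 1) = (L + 1) + k by omega]
    exact ih (L + 1) (by omega)

theorem legoA2_spec (N L : Nat) :
    legoA2 N ((List.range L).map traw) = (List.range L).map (tP N) := by
  unfold legoA2
  apply List.ext_getElem
  · simp
  · intro i h1 h2
    simp only [List.getElem_mapIdx, List.getElem_map, List.getElem_range]
    by_cases hi : i = 0
    · subst hi; simp [tP, traw, trawAux]
    · simp [tP, hi]

theorem tA_eq (N M : Nat) :
    legoA2 N (legoA1 [1] M) = (List.range (M + 1)).map (tP N) := by
  have h0 : ([1] : List Int) = (List.range 1).map traw := by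
    simp [List.range_succ, traw, trawAux]
  rw [h0, legoA1_spec M 1 (le_refl 1), Nat.add_comm 1 M, legoA2_spec]

theorem emod_add4 (a b c d : Int) :
    (a % pvMOD + b % pvMOD + c % pvMOD + d % pvMOD) % pvMOD = (a + b + c + d) % pvMOD := by
  have h : ∀ x : Int, Int.ModEq pvMOD (x % pvMOD) x :=
    fun x => Int.emod_emod_of_dvd x dvd_rfl
  exact (((h a).add (h b)).add (h c)).add (h d)

theorem tP_one (N : Nat) : tP N 1 = 1 := by
  unfold tP
  rw [if_neg one_ne_zero, traw_one]
  norm_num [pvMOD]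

-- unfolding lemmas for A's g loop
theorem legoA3_succ (t gl : List Int) (k : Nat) :
    legoA3 t gl (k + 1) = legoA3 t (gl ++ [legoSumG gl t gl.length % pvMOD]) k := rfl

theorem legoA3_getD_lt (t : List Int) (k : Nat) : ∀ (gl : List Int) (j : Nat),
    j < gl.length → (legoA3 t gl k).getD j 0 = gl.getD j 0 := by
  induction k with
  | zero => intro gl j _; simp [legoA3]
  | succ k ih =>
    intro gl j hj
    rw [legoA3_succ, ih _ j (by simp only [List.length_append, List.length_cons, List.length_nil]; omega), getD_append_lt _ _ _ hj]

theorem legoSumG_congr (g₁ g₂ t : List Int) (i : Nat) (hi : 1 ≤ i)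
    (h : ∀ j, 1 ≤ j → j < i → g₁.getD j 0 = g₂.getD j 0) :
    legoSumG g₁ t i = legoSumG g₂ t i := by
  unfold legoSumG
  apply PySem.List.foldl_congr_mem
  intro acc x hx
  rw [List.mem_range'_1] at hx
  rw [h x hx.1 (by omega)]

theorem legoA3_entry (t : List Int) (k : Nat) : ∀ (gl : List Int), 1 ≤ gl.length →
    ∀ i, gl.length ≤ i → i < gl.length + k →
    (legoA3 t gl k).getD i 0 = legoSumG (legoA3 t gl k) t i % pvMOD := by
  induction k with
  | zero => intro gl _ i h1 h2; omega
  | succ k ih =>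
    intro gl hgl i h1 h2
    rw [legoA3_succ]
    rcases eq_or_lt_of_le h1 with he | hlt
    · have hpre : (legoA3 t (gl ++ [legoSumG gl t gl.length % pvMOD]) k).getD i 0
          = (gl ++ [legoSumG gl t gl.length % pvMOD]).getD i 0 :=
        legoA3_getD_lt t k _ i (by simp only [List.length_append, List.length_cons, List.length_nil]; omega)
      rw [hpre, ← he, getD_append_self]
      have hsum : legoSumG (legoA3 t (gl ++ [legoSumG gl t gl.length % pvMOD]) k) t gl.length
          = legoSumG gl t gl.length := by
        apply legoSumG_congr _ _ _ _ hgl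
        intro j _ hj
        rw [legoA3_getD_lt t k _ j (by simp only [List.length_append, List.length_cons, List.length_nil]; omega), getD_append_lt _ _ _ (by omega)]
      rw [hsum]
    · exact ih _ (by simp only [List.length_append, List.length_cons, List.length_nil]; omega) i (by simp only [List.length_append, List.length_cons, List.length_nil]; omega) (by simp only [List.length_append, List.length_cons, List.length_nil]; omega)

theorem foldl_sub_sum (f : Nat → Int) (a : Int) (k : Nat) :
    (List.range' 1 k).foldl (fun s j => s - f j) a
      = a - ∑ j ∈ Finset.range k, f (j + 1) := by
  induction k with
  | zero => simp
  | succ k ih =>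
    rw [List.range'_1_concat, List.foldl_append, ih, Finset.sum_range_succ]
    simp only [List.foldl_cons, List.foldl_nil]
    rw [Nat.add_comm 1 k]
    ring

theorem pvMOD_cast : pvMOD = ((1000000007 : ℕ) : ℤ) := by norm_num [pvMOD]

theorem emod_cast (a : Int) :
    ((a % pvMOD : Int) : ZMod 1000000007) = (a : ZMod 1000000007) := by
  rw [pvMOD_cast]
  exact (ZMod.intCast_eq_intCast_iff _ _ _).mpr (Int.emod_emod_of_dvd a dvd_rfl)

-- ---- bMul correctness ----

theorem zc_take (l : List Int) (n i : Nat) (h : i < n) : zc (l.take n) i = zc l i := by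
  simp [zc, List.getD_eq_getElem?_getD, h]

theorem getD_zero_of_le (l : List Int) (i : Nat) (h : l.length ≤ i) : l.getD i 0 = 0 := by
  simp [List.getD_eq_getElem?_getD, List.getElem?_eq_none h]

theorem foldl_mul_shift (l : List (Int × Int)) : ∀ (c : Int),
    l.foldl (fun acc p => acc + p.1 * p.2) c = c + l.foldl (fun acc p => acc + p.1 * p.2) 0 := by
  induction l with
  | nil => intro c; simp
  | cons x xs ih =>
    intro c
    simp only [List.foldl_cons]
    rw [ih (c + x.1 * x.2), ih (0 + x.1 * x.2)]
    ring

theorem zip_mul_sum : ∀ (u v : List Int),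
    (u.zip v).foldl (fun acc p => acc + p.1 * p.2) 0
      = ∑ r ∈ Finset.range (min u.length v.length), u.getD r 0 * v.getD r 0 := by
  intro u
  induction u with
  | nil => intro v; simp
  | cons u0 us ih =>
    intro v
    cases v with
    | nil => simp
    | cons v0 vs =>
      rw [show (u0 :: us).zip (v0 :: vs) = (u0, v0) :: us.zip vs from rfl]
      rw [List.foldl_cons, foldl_mul_shift, ih vs]
      rw [show min (u0 :: us).length (v0 :: vs).length = min us.length vs.length + 1 by
        simp [List.length_cons, Nat.succ_min_succ]]
      rw [Finset.sum_range_succ']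
      simp only [List.getD_cons_succ, List.getD_cons_zero]
      ring

theorem getD_drop_take (a : List Int) (lo T r : Nat) (hr : r < T) :
    ((a.drop lo).take T).getD r 0 = a.getD (lo + r) 0 := by
  simp [List.getD_eq_getElem?_getD, hr, List.getElem?_drop]

theorem getD_rev_take (b : List Int) (T r : Nat) (hT : T ≤ b.length) (hr : r < T) :
    ((b.take T).reverse).getD r 0 = b.getD (T - 1 - r) 0 := by
  have hlen : (b.take T).length = T := by simp [hT]
  rw [List.getD_eq_getElem?_getD,
    List.getElem?_reverse (by rw [hlen]; exact hr), hlen]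
  rw [show (b.take T)[T - 1 - r]? = b[T - 1 - r]? by
    rw [List.getElem?_take]
    rw [if_pos (by omega)]]
  rfl

theorem bMulCoeff_eq (a b : List Int) (s : Nat) :
    bMulCoeff a b s = ∑ i ∈ Finset.range (s + 1), a.getD i 0 * b.getD (s - i) 0 := by
  by_cases hb : b.length = 0
  · have hbnil : b = [] := List.length_eq_zero_iff.mp hb
    subst hbnil
    simp [bMulCoeff]
  · have hb1 : 1 ≤ b.length := by omega
    rw [bMulCoeff]
    set lo := s + 1 - b.length with hlo
    have hlos : lo ≤ s := by omega
    have hT2 : s - lo + 1 ≤ b.length := by omega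
    show (((a.drop lo).take (s + 1 - lo)).zip ((b.take (s - lo + 1)).reverse)).foldl
      (fun acc p => acc + p.1 * p.2) 0 = _
    rw [zip_mul_sum]
    have hulen : ((a.drop lo).take (s + 1 - lo)).length = min (s + 1 - lo) (a.length - lo) := by
      simp [List.length_take, List.length_drop]
    have hvlen : ((b.take (s - lo + 1)).reverse).length = s - lo + 1 := by
      rw [List.length_reverse, List.length_take]
      omega
    set L := min (s + 1 - lo) (a.length - lo) with hL
    rw [show min ((a.drop lo).take (s + 1 - lo)).length ((b.take (s - lo + 1)).reverse).length
        = L by rw [hulen, hvlen]; omega]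
    have hterm : ∀ r ∈ Finset.range L,
        ((a.drop lo).take (s + 1 - lo)).getD r 0 * ((b.take (s - lo + 1)).reverse).getD r 0
          = a.getD (lo + r) 0 * b.getD (s - (lo + r)) 0 := by
      intro r hr
      rw [Finset.mem_range] at hr
      rw [getD_drop_take a lo _ r (by omega), getD_rev_take b (s - lo + 1) r hT2 (by omega),
        show s - lo + 1 - 1 - r = s - (lo + r) by omega]
    rw [Finset.sum_congr rfl hterm]
    rw [show (∑ r ∈ Finset.range L, a.getD (lo + r) 0 * b.getD (s - (lo + r)) 0)
        = ∑ i ∈ Finset.Ico lo (lo + L), a.getD i 0 * b.getD (s - i) 0 by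
      rw [Finset.sum_Ico_eq_sum_range, show lo + L - lo = L by omega]]
    apply Finset.sum_subset
    · intro x hx
      rw [Finset.mem_Ico] at hx
      rw [Finset.mem_range]
      omega
    · intro i hi hni
      rw [Finset.mem_range] at hi
      rw [Finset.mem_Ico, not_and_or, not_le, not_lt] at hni
      rcases hni with h | h
      · rw [getD_zero_of_le b (s - i) (by omega), mul_zero]
      · rw [getD_zero_of_le a i (by omega), zero_mul]

theorem bMul_length (a b : List Int) (k : Nat) : (bMul a b k).length = k := by
  simp [bMul]

theorem bMul_coeff (a b : List Int) (k : Nat) (s : Nat) (hs : s < k) :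
    zc (bMul a b k) s = ∑ i ∈ Finset.range (s + 1), zc a i * zc b (s - i) := by
  rw [zc, show (bMul a b k).getD s 0 = bMulCoeff a b s % pvMOD by
      rw [bMul]; exact getD_map_range _ k s hs]
  rw [emod_cast, bMulCoeff_eq]
  push_cast
  rfl

theorem coeff_mk_mul (f g : Nat → ZMod 1000000007) (s : Nat) :
    PowerSeries.coeff s (PowerSeries.mk f * PowerSeries.mk g)
      = ∑ i ∈ Finset.range (s + 1), f i * g (s - i) := by
  rw [PowerSeries.coeff_mul, Finset.Nat.sum_antidiagonal_eq_sum_range_succ_mk]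
  simp

theorem bMul_ps (a b : List Int) (k : Nat) (s : Nat) (hs : s < k) :
    zc (bMul a b k) s = PowerSeries.coeff s (psOf a * psOf b) := by
  rw [psOf, psOf, coeff_mk_mul, bMul_coeff a b k s hs]

theorem coeff_mul_congr (φ ψ ψ' : PowerSeries (ZMod 1000000007)) (n : Nat)
    (h : ∀ i, i ≤ n → PowerSeries.coeff i ψ
      = PowerSeries.coeff i ψ') :
    PowerSeries.coeff n (φ * ψ)
      = PowerSeries.coeff n (φ * ψ') := by
  rw [PowerSeries.coeff_mul, PowerSeries.coeff_mul]
  apply Finset.sum_congr rfl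
  intro p hp
  rw [Finset.mem_antidiagonal] at hp
  rw [h p.2 (by omega)]

theorem coeff_two (d : Nat) :
    PowerSeries.coeff d (2 : PowerSeries (ZMod 1000000007)) = if d = 0 then 2 else 0 := by
  rw [show (2 : PowerSeries (ZMod 1000000007)) = 1 + 1 by norm_num, map_add,
    PowerSeries.coeff_one]
  split_ifs <;> norm_num

theorem newton_alg (W : PowerSeries (ZMod 1000000007)) (k s : Nat) (hs : s < 2 * k)
    (hW : ∀ i, i < k → PowerSeries.coeff i W
      = PowerSeries.coeff i 1) :
    PowerSeries.coeff s (2 * W - W * W)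
      = PowerSeries.coeff s 1 := by
  have hE : ∀ i, i < k → PowerSeries.coeff i (W - 1) = 0 := by
    intro i hi
    rw [map_sub, hW i hi, sub_self]
  have h2 : (2 * W - W * W : PowerSeries (ZMod 1000000007)) = 1 - (W - 1) * (W - 1) := by ring
  rw [h2, map_sub]
  have hz : PowerSeries.coeff s ((W - 1) * (W - 1)) = 0 := by
    rw [PowerSeries.coeff_mul]
    apply Finset.sum_eq_zero
    intro p hp
    rw [Finset.mem_antidiagonal] at hp
    rcases lt_or_ge p.1 k with h | h
    · rw [hE p.1 h, zero_mul]
    · rw [hE p.2 (by omega), mul_zero]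
  rw [hz, sub_zero]

theorem newton_step (T inv : List Int) (k size : Nat) (hk1 : 1 ≤ k) (hks : k < size)
    (hInv : BInv T inv k) :
    BInv T (bMul inv
      (((2 - (bMul (T.take (min (2 * k) size)) inv (min (2 * k) size)).getD 0 0) % pvMOD)
        :: ((bMul (T.take (min (2 * k) size)) inv (min (2 * k) size)).drop 1).map
            (fun x => (-x) % pvMOD))
      (min (2 * k) size)) (min (2 * k) size) := by
  set k' := min (2 * k) size with hk'
  have hk'1 : 1 ≤ k' := by omega
  have hk'2 : k' ≤ 2 * k := by omega
  set e := bMul (T.take k') inv k' with he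
  set c := ((2 - e.getD 0 0) % pvMOD) :: (e.drop 1).map (fun x => (-x) % pvMOD) with hc
  set W := psOf T * psOf inv with hW
  -- e's coefficients are those of T * inv below k'
  have hecoeff : ∀ s, s < k' → zc e s = PowerSeries.coeff s W := by
    intro s hs
    rw [he, bMul_ps _ _ _ s hs, hW]
    rw [mul_comm (psOf (T.take k')) (psOf inv), mul_comm (psOf T) (psOf inv)]
    apply coeff_mul_congr
    intro i hi
    rw [psOf, psOf, PowerSeries.coeff_mk, PowerSeries.coeff_mk, zc_take T k' i (by omega)]
  have helen : e.length = k' := bMul_length _ _ _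
  -- c's coefficients are those of 2 - T*inv below k'
  have hccoeff : ∀ d, d < k' → zc c d = PowerSeries.coeff d (2 - W) := by
    intro d hd
    rw [map_sub, coeff_two]
    cases d with
    | zero =>
      rw [if_pos rfl]
      have h0 : zc c 0 = (((2 - e.getD 0 0) % pvMOD : Int) : ZMod 1000000007) := rfl
      rw [h0, emod_cast]
      push_cast
      rw [show ((e.getD 0 0 : Int) : ZMod 1000000007) = zc e 0 from rfl, hecoeff 0 hd]
    | succ j =>
      rw [if_neg (Nat.succ_ne_zero j)]
      have hgd : c.getD (j + 1) 0 = (-(e.getD (j + 1) 0)) % pvMOD := by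
        rw [hc]
        have hj1 : j + 1 < e.length := by omega
        simp [List.getD_eq_getElem?_getD, List.getElem?_eq_getElem hj1]
      rw [show zc c (j + 1) = ((c.getD (j + 1) 0 : Int) : ZMod 1000000007) from rfl, hgd,
        emod_cast]
      push_cast
      rw [show ((e.getD (j + 1) 0 : Int) : ZMod 1000000007) = zc e (j + 1) from rfl,
        hecoeff (j + 1) hd]
      ring
  -- the main computation
  intro s hs
  have hinv' : ∀ b, b ≤ s → PowerSeries.coeff b (psOf (bMul inv c k'))
      = PowerSeries.coeff b (psOf inv * psOf c) := by
    intro b hb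
    rw [psOf, PowerSeries.coeff_mk]
    exact bMul_ps inv c k' b (by omega)
  rw [show psOf T * psOf (bMul inv c k') = psOf T * psOf (bMul inv c k') from rfl]
  rw [coeff_mul_congr _ _ (psOf inv * psOf c) s hinv']
  have hc' : ∀ b, b ≤ s → PowerSeries.coeff b (psOf inv * psOf c)
      = PowerSeries.coeff b (psOf inv * (2 - W)) := by
    intro b hb
    apply coeff_mul_congr
    intro d hd
    rw [show PowerSeries.coeff d (psOf c) = zc c d by
      rw [psOf, PowerSeries.coeff_mk]]
    exact hccoeff d (by omega)
  rw [coeff_mul_congr _ _ (psOf inv * (2 - W)) s hc']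
  have halg : psOf T * (psOf inv * (2 - W)) = 2 * W - W * W := by
    rw [hW]; ring
  rw [halg]
  exact newton_alg W k s (by omega) hInv

theorem bNewton_succ (t : List Int) (size : Nat) (inv : List Int) (k fuel : Nat) :
    bNewton t size inv k (fuel + 1) =
      if k < size then
        bNewton t size (bMul inv
          (((2 - (bMul (t.take (min (2 * k) size)) inv (min (2 * k) size)).getD 0 0) % pvMOD)
            :: ((bMul (t.take (min (2 * k) size)) inv (min (2 * k) size)).drop 1).map
                (fun x => (-x) % pvMOD))
          (min (2 * k) size)) (min (2 * k) size) fuel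
      else inv := rfl

theorem newton_loop (T : List Int) (size : Nat) :
    ∀ fuel k inv, 1 ≤ k → k ≤ size → size ≤ k + fuel → BInv T inv k →
    BInv T (bNewton T size inv k fuel) size := by
  intro fuel
  induction fuel with
  | zero =>
    intro k inv hk1 hk2 hk3 hInv
    have : k = size := by omega
    subst this
    exact hInv
  | succ fuel ih =>
    intro k inv hk1 hk2 hk3 hInv
    rw [bNewton_succ]
    by_cases h : k < size
    · rw [if_pos h]
      exact ih (min (2 * k) size) _ (by omega) (by omega) (by omega)
        (newton_step T inv k size hk1 h hInv)
    · rw [if_neg h]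
      have : k = size := by omega
      subst this
      exact hInv

-- ---- B's t-list equals A's ----

theorem bRowsLoop_spec (k : Nat) : ∀ L, 4 ≤ L →
    bRowsLoop ((List.range L).map rowm) k = (List.range (L + k)).map rowm := by
  induction k with
  | zero => intro L _; simp [bRowsLoop]
  | succ k ih =>
    intro L hL
    have hlen : ((List.range L).map rowm).length = L := by simp
    rw [show bRowsLoop ((List.range L).map rowm) (k + 1)
        = bRowsLoop ((List.range L).map rowm
          ++ [(((List.range L).map rowm).getD (((List.range L).map rowm).length - 1) 0
            + ((List.range L).map rowm).getD (((List.range L).map rowm).length - 2) 0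
            + ((List.range L).map rowm).getD (((List.range L).map rowm).length - 3) 0
            + ((List.range L).map rowm).getD (((List.range L).map rowm).length - 4) 0) % pvMOD]) k
        from rfl]
    have hv : (((List.range L).map rowm).getD (((List.range L).map rowm).length - 1) 0
        + ((List.range L).map rowm).getD (((List.range L).map rowm).length - 2) 0
        + ((List.range L).map rowm).getD (((List.range L).map rowm).length - 3) 0
        + ((List.range L).map rowm).getD (((List.range L).map rowm).length - 4) 0) % pvMOD
        = rowm L := by
      rw [hlen, getD_map_range rowm L (L - 1) (by omega), getD_map_range rowm L (L - 2) (by omega),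
        getD_map_range rowm L (L - 3) (by omega), getD_map_range rowm L (L - 4) (by omega)]
      unfold rowm
      rw [emod_add4]
      have := legoA1_step L (by omega)
      rw [if_pos (by omega : 2 ≤ L), if_pos (by omega : 3 ≤ L), if_pos (by omega : 4 ≤ L)] at this
      rw [this]
    rw [hv]
    have happ : (List.range L).map rowm ++ [rowm L] = (List.range (L + 1)).map rowm := by
      rw [List.range_succ]; simp
    rw [happ, show L + (k + 1) = (L + 1) + k by omega]
    exact ih (L + 1) (by omega)

theorem rows_init : ([1, 1, 2, 4] : List Int) = (List.range 4).map rowm := by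
  norm_num [rowm, traw, trawAux, pvMOD, List.range_succ]

theorem tB_eq (N M : Nat) :
    ((bRowsLoop [1, 1, 2, 4] ((M + 1) - 4)).take (M + 1)).map (fun c => (c ^ N) % pvMOD)
      = (List.range (M + 1)).map (tP N) := by
  rw [rows_init, bRowsLoop_spec _ 4 (le_refl 4)]
  have hL : M + 1 ≤ 4 + ((M + 1) - 4) := by omega
  rw [← List.map_take, List.take_range, show min (M + 1) (4 + ((M + 1) - 4)) = M + 1 by omega,
    List.map_map]
  apply List.map_congr_left
  intro i hi
  rw [List.mem_range] at hi
  show (rowm i ^ N) % pvMOD = tP N i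
  by_cases h0 : i = 0
  · subst h0
    have : rowm 0 = 1 := by norm_num [rowm, traw, trawAux, pvMOD]
    rw [this, tP, if_pos rfl]
    norm_num [pvMOD]
  · rw [tP, if_neg h0]; rfl

-- ---- relating A's g array to the reciprocal series ----

theorem main_inv (N M : Nat) (hM : 1 ≤ M) (inv : List Int)
    (hInv : BInv ((List.range (M + 1)).map (tP N)) inv (M + 1)) :
    ∀ i, 1 ≤ i → i ≤ M →
      (((legoA3 ((List.range (M + 1)).map (tP N)) [0, 1] (M - 1)).getD i 0 : Int)
        : ZMod 1000000007) = -(zc inv i) := by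
  set t := (List.range (M + 1)).map (tP N) with ht
  set f := zc t with hf
  have hcv : ∀ s, s ≤ M → ∑ a ∈ Finset.range (s + 1), f a * zc inv (s - a)
      = if s = 0 then 1 else 0 := by
    intro s hs
    have := hInv s (by omega)
    rw [psOf, psOf, coeff_mk_mul, PowerSeries.coeff_one] at this
    exact this
  have hf0 : f 0 = 1 := by
    rw [hf, ht, zc, getD_map_range (tP N) (M + 1) 0 (by omega), tP, if_pos rfl]
    norm_num
  have hfi : ∀ i, i ≤ M → f i = ((t.getD i 0 : Int) : ZMod 1000000007) := fun i _ => rfl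
  have hI0 : zc inv 0 = 1 := by
    have := hcv 0 (by omega)
    rw [if_pos rfl] at this
    rw [Finset.sum_range_one] at this
    rw [hf0, one_mul] at this
    simpa using this
  have hrec : ∀ i, 1 ≤ i → i ≤ M →
      -(zc inv i) = f i + ∑ j ∈ Finset.range (i - 1), f (j + 1) * zc inv (i - 1 - j) := by
    intro i hi1 hi2
    obtain ⟨i', rfl⟩ : ∃ i', i = i' + 1 := ⟨i - 1, by omega⟩
    have h0 := hcv (i' + 1) hi2
    rw [if_neg (by omega)] at h0
    rw [Finset.sum_range_succ'] at h0
    -- h0 : ∑ a ∈ range (i'+1), f (a+1) * zc inv (i'+1-(a+1)) + f 0 * zc inv (i'+1) = 0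
    rw [Finset.sum_range_succ] at h0
    rw [hf0, one_mul] at h0
    have hlast : f (i' + 1) * zc inv (i' + 1 - (i' + 1)) = f (i' + 1) := by
      rw [show i' + 1 - (i' + 1) = 0 by omega, hI0, mul_one]
    rw [hlast] at h0
    have hsum : ∑ a ∈ Finset.range i', f (a + 1) * zc inv (i' + 1 - (a + 1))
        = ∑ j ∈ Finset.range (i' + 1 - 1), f (j + 1) * zc inv (i' + 1 - 1 - j) := by
      apply Finset.sum_congr (by congr 1)
      intro j hj
      rw [Finset.mem_range] at hj
      rw [show i' + 1 - (j + 1) = i' + 1 - 1 - j by omega]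
    rw [hsum] at h0
    linear_combination -h0
  intro i
  induction i using Nat.strong_induction_on with
  | _ i IH =>
  intro hi1 hi2
  rcases eq_or_lt_of_le hi1 with he1 | hi2'
  · -- i = 1
    rw [← he1]
    have hG1 : (legoA3 t [0, 1] (M - 1)).getD 1 0 = 1 := by
      rw [legoA3_getD_lt t (M - 1) [0, 1] 1 (by simp)]; rfl
    rw [hG1]
    have := hrec 1 (le_refl 1) (by omega)
    rw [show (1 : Nat) - 1 = 0 from rfl, Finset.sum_range_zero, add_zero] at this
    have hf1 : f 1 = 1 := by
      rw [hf, ht, zc, getD_map_range (tP N) (M + 1) 1 (by omega), tP_one]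
      norm_num
    rw [this, hf1]
    norm_num
  · -- 2 ≤ i
    obtain ⟨i', rfl⟩ : ∃ i', i = i' + 1 := ⟨i - 1, by omega⟩
    have hi'1 : 1 ≤ i' := by omega
    have hG : (legoA3 t [0, 1] (M - 1)).getD (i' + 1) 0
        = legoSumG (legoA3 t [0, 1] (M - 1)) t (i' + 1) % pvMOD :=
      legoA3_entry t (M - 1) [0, 1] (by simp) (i' + 1)
        (by simp only [List.length_cons, List.length_nil]; omega)
        (by simp only [List.length_cons, List.length_nil]; omega)
    rw [hG, emod_cast]
    rw [legoSumG, foldl_sub_sum (fun j => (legoA3 t [0, 1] (M - 1)).getD j 0 * t.getD (i' + 1 - j) 0)]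
    push_cast
    have hterm : ∀ j ∈ Finset.range i',
        (((legoA3 t [0, 1] (M - 1)).getD (j + 1) 0 : Int) : ZMod 1000000007)
            * ((t.getD (i' - j) 0 : Int) : ZMod 1000000007)
          = (-(zc inv (j + 1))) * f (i' - j) := by
      intro j hj
      rw [Finset.mem_range] at hj
      rw [IH (j + 1) (by omega) (by omega) (by omega)]
      rfl
    rw [Finset.sum_congr rfl hterm]
    rw [hrec (i' + 1) (by omega) hi2]
    rw [show i' + 1 - 1 = i' by omega]
    have hrefl : ∑ j ∈ Finset.range i', f (j + 1) * zc inv (i' - j)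
        = ∑ j ∈ Finset.range i', f (i' - j) * zc inv (j + 1) := by
      rw [← Finset.sum_range_reflect]
      apply Finset.sum_congr rfl
      intro j hj
      rw [Finset.mem_range] at hj
      rw [show i' - 1 - j + 1 = i' - j by omega, show i' - (i' - 1 - j) = j + 1 by omega]
    rw [hrefl]
    rw [show ((t.getD (i' + 1) 0 : Int) : ZMod 1000000007) = f (i' + 1) from rfl]
    simp only [neg_mul]
    rw [Finset.sum_neg_distrib, sub_neg_eq_add]
    congr 1
    exact Finset.sum_congr rfl (fun x _ => mul_comm _ _)

-- the canonical-range argument: two ints in [0, pvMOD) with equal casts are equal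
theorem int_eq_of_cast (a b : Int) (ha1 : 0 ≤ a) (ha2 : a < pvMOD) (hb1 : 0 ≤ b)
    (hb2 : b < pvMOD) (h : (a : ZMod 1000000007) = (b : ZMod 1000000007)) : a = b := by
  have hmod := (ZMod.intCast_eq_intCast_iff _ _ _).mp h
  have : a % (1000000007 : Int) = b % (1000000007 : Int) := hmod
  have hp : pvMOD = (1000000007 : Int) := by norm_num [pvMOD]
  rw [hp] at ha2 hb2
  omega

-- ===== VERDICT (by name: the statement is the Claim_ definition above) =====
theorem legoBlocks_spec : Claim_equal_legoBlocks := by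
  unfold Claim_equal_legoBlocks Spec_legoBlocks
  intro n m hdom hpre
  obtain ⟨hn, hm⟩ := hpre
  set M := m.toNat with hMdef
  have hM : 1 ≤ M := by omega
  set N := n.toNat with hNdef
  set t : List Int := (List.range (M + 1)).map (tP N) with ht
  have hA : legoBlocks n m = (legoA3 t [0, 1] (M - 1)).getD M 0 := by
    show (legoA3 (legoA2 N (legoA1 [1] M)) [0, 1] (M - 1)).getD M 0 = _
    rw [tA_eq N M]
  have htB : ((bRowsLoop [1, 1, 2, 4] ((M + 1) - 4)).take (M + 1)).map
      (fun c => (c ^ N) % pvMOD) = t := tB_eq N M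
  have hB : legoBlocks_alt n m
      = (pvMOD - (bNewton t (M + 1) [1] 1 (M + 1)).getD M 0) % pvMOD := by
    show (pvMOD - (bNewton (((bRowsLoop [1, 1, 2, 4] ((M + 1) - 4)).take (M + 1)).map
        (fun c => (c ^ N) % pvMOD)) (M + 1) [1] 1 (M + 1)).getD M 0) % pvMOD = _
    rw [htB]
  set inv := bNewton t (M + 1) [1] 1 (M + 1) with hinv
  have hInit : BInv t [1] 1 := by
    intro s hs
    have hs0 : s = 0 := by omega
    subst hs0
    rw [psOf, psOf, coeff_mk_mul, PowerSeries.coeff_one, if_pos rfl, Finset.sum_range_one]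
    have hz1 : zc [1] 0 = 1 := rfl
    have hT0 : zc t 0 = 1 := by
      rw [ht, zc, getD_map_range (tP N) (M + 1) 0 (by omega), tP, if_pos rfl]
      norm_num
    rw [hz1, hT0, mul_one]
  have hInv : BInv t inv (M + 1) :=
    newton_loop t (M + 1) (M + 1) 1 [1] (le_refl 1) (by omega) (by omega) hInit
  have hcast := main_inv N M hM inv hInv M hM (le_refl M)
  rw [hA, hB]
  have hpv : (0 : Int) < pvMOD := by norm_num [pvMOD]
  -- bounds for the A side
  have hAbound : 0 ≤ (legoA3 t [0, 1] (M - 1)).getD M 0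
      ∧ (legoA3 t [0, 1] (M - 1)).getD M 0 < pvMOD := by
    rcases eq_or_lt_of_le hM with h1 | h2
    · rw [← h1]
      have h1' : (legoA3 t [0, 1] (1 - 1)).getD 1 0 = 1 := by
        rw [legoA3_getD_lt t (1 - 1) [0, 1] 1 (by simp)]; rfl
      rw [h1']
      exact ⟨by norm_num, by norm_num [pvMOD]⟩
    · have := legoA3_entry t (M - 1) [0, 1] (by simp) M
        (by simp only [List.length_cons, List.length_nil]; omega)
        (by simp only [List.length_cons, List.length_nil]; omega)
      rw [this]
      exact ⟨Int.emod_nonneg _ (by norm_num [pvMOD]), Int.emod_lt_of_pos _ hpv⟩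
  have hBbound : 0 ≤ (pvMOD - inv.getD M 0) % pvMOD
      ∧ (pvMOD - inv.getD M 0) % pvMOD < pvMOD :=
    ⟨Int.emod_nonneg _ (by norm_num [pvMOD]), Int.emod_lt_of_pos _ hpv⟩
  apply int_eq_of_cast _ _ hAbound.1 hAbound.2 hBbound.1 hBbound.2
  rw [hcast, emod_cast]
  push_cast
  rw [show ((pvMOD : Int) : ZMod 1000000007) = 0 by
    rw [pvMOD_cast]; push_cast; exact ZMod.natCast_self 1000000007]
  rw [show ((inv.getD M 0 : Int) : ZMod 1000000007) = zc inv M from rfl]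
  ring
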